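-- pv_equiv track=rewrite | github.com/RohanpatelUpenn/FISHnet | FISHnet/FISHnet_support_functions.py | find_close_values
-- ===== SOURCE A (Python) =====
-- def find_close_values(lst, threshold=2):
--
--     if len(lst) == 0:
--         return []
--
--     lst.sort()  # Sort the list to simplify the comparison process
--     groups = []
--
--     current_group = [lst[0]]
--
--     for i in range(1, len(lst)):
--         if abs(lst[i] - lst[i-1]) <= threshold:
--             current_group.append(lst[i])
--         else:
--             groups.append(current_group)
--             current_group = [lst[i]]
--
--     groups.append(current_group)  # Append the last group
--
--     return groups
-- ===== SOURCE B (Python) =====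
-- def find_close_values(lst, threshold=2):
--     if len(lst) == 0:
--         return []
--     lst.sort()
--     cuts = [i for i in range(1, len(lst)) if abs(lst[i] - lst[i - 1]) > threshold]
--     bounds = [0] + cuts + [len(lst)]
--     return [lst[a:b] for a, b in zip(bounds, bounds[1:])]
-- ===== Notes on version B (the rewrite author's own statement) =====
-- stated objective: alternative
-- what changed: Instead of accumulating a growing current group element by element, B makes one pass collecting the cut positions (gaps larger than threshold) and then partitions the sorted list by slicing between successive boundaries.
import Mathlib
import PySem

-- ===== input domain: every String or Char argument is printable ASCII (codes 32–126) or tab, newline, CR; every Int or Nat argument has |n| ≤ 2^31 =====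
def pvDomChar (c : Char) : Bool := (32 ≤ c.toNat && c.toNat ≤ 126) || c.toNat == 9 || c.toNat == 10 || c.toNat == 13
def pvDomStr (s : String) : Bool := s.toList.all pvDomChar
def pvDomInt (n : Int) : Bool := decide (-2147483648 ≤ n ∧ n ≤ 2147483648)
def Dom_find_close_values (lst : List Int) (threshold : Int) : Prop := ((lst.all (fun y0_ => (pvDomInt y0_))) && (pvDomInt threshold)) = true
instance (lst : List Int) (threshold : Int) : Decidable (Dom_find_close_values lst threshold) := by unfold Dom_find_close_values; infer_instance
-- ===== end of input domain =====

-- B replaces A's incremental group accumulation by one pass collecting cut positions, then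
-- partitions the sorted list by slicing between successive boundaries (alternative decomposition).
-- Both Pythons sort `lst` in place; the equivalence proved here is about the RETURN value
-- (B performs the same in-place sort, so the caller-visible mutation also matches).
-- All indices i, i-1 used below lie in range, so pyGetD is exact for Python's lst[i].

-- ===== PORT A =====
def find_close_values (lst : List Int) (threshold : Int) : List (List Int) :=
  if lst.length = 0 then [] else
    let s := PySem.List.sorted lst (fun x => x) false
    let st := (PySem.List.pyRange 1 (s.length : Int) 1).foldl
      (fun (st : List (List Int) × List Int) i =>
        if |PySem.List.pyGetD s i 0 - PySem.List.pyGetD s (i - 1) 0| ≤ threshold then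
          (st.1, st.2 ++ [PySem.List.pyGetD s i 0])
        else
          (st.1 ++ [st.2], [PySem.List.pyGetD s i 0]))
      ([], [PySem.List.pyGetD s 0 0])
    st.1 ++ [st.2]

-- ===== PORT B =====
def find_close_values_alt (lst : List Int) (threshold : Int) : List (List Int) :=
  if lst.length = 0 then [] else
    let s := PySem.List.sorted lst (fun x => x) false
    let cuts := (PySem.List.pyRange 1 (s.length : Int) 1).filter
      (fun i => decide (threshold < |PySem.List.pyGetD s i 0 - PySem.List.pyGetD s (i - 1) 0|))
    let bounds := 0 :: (cuts ++ [(s.length : Int)])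
    (bounds.zip bounds.tail).map (fun ab => PySem.List.slice s (some ab.1) (some ab.2))

-- ===== PRECONDITION & SPEC =====
def Spec_find_close_values (lst : List Int) (threshold : Int) (out : List (List Int)) : Prop := out = find_close_values_alt lst threshold
instance (lst : List Int) (threshold : Int) (out : List (List Int)) : Decidable (Spec_find_close_values lst threshold out) := by unfold Spec_find_close_values; infer_instance

-- ===== CLAIM (what is proved, stated in full; the proofs are below) =====
def Claim_equal_find_close_values : Prop := ∀ (lst : List Int) (threshold : Int), Dom_find_close_values lst threshold → Spec_find_close_values lst threshold (find_close_values lst threshold)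

-- ===== LEMMAS AND PROOFS =====

/-- Groups as slices of `s` between boundary `j`, the cut list, and the final boundary `n`. -/
def slicesOf (s : List Int) (n : Int) : Int → List Int → List (List Int)
  | j, [] => [PySem.List.slice s (some j) (some n)]
  | j, b :: bs => PySem.List.slice s (some j) (some b) :: slicesOf s n b bs

theorem slice_snoc (s : List Int) (j m : Int) (h0 : 0 ≤ j) (hjm : j ≤ m)
    (hm : m < (s.length : Int)) :
    PySem.List.slice s (some j) (some m) ++ [PySem.List.pyGetD s m 0]
      = PySem.List.slice s (some j) (some (m + 1)) := by
  have h0m : 0 ≤ m := le_trans h0 hjm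
  rw [PySem.List.slice_toNat _ h0 h0m, PySem.List.slice_toNat _ h0 (by omega),
    PySem.List.pyGetD_eq_getElem s 0 h0m hm]
  have hmlen : m.toNat < s.length := by omega
  have hdl : m.toNat - j.toNat < (s.drop j.toNat).length := by
    simp [List.length_drop]; omega
  have hget : (s.drop j.toNat)[m.toNat - j.toNat]'hdl = s[m.toNat]'hmlen := by
    rw [List.getElem_drop]; congr 1; omega
  have htn : (m + 1).toNat - j.toNat = (m.toNat - j.toNat) + 1 := by omega
  rw [htn, List.take_add_one, List.getElem?_eq_getElem hdl, hget]
  simp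

theorem zipmap_slices (s : List Int) (n : Int) :
    ∀ (cuts : List Int) (a : Int),
      (((a :: (cuts ++ [n])).zip (cuts ++ [n])).map
        (fun ab => PySem.List.slice s (some ab.1) (some ab.2)))
        = slicesOf s n a cuts := by
  intro cuts
  induction cuts with
  | nil => intro a; simp [slicesOf]
  | cons c cs ih =>
    intro a
    simp only [List.cons_append, List.zip_cons_cons, List.map_cons, slicesOf]
    exact congrArg _ (ih c)

/-- Main invariant: folding A's step over indices `[m, n)` starting from accumulated groups
`g0` and current group `slice s j m` yields `g0` followed by the slice-partition of `[j, n)`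
at the cuts found in `[m, n)`. -/
theorem fold_eq_slices (s : List Int) (threshold : Int) :
    ∀ (k : Nat) (m j : Int) (g0 : List (List Int)),
      0 ≤ j → j ≤ m → m ≤ (s.length : Int) → ((s.length : Int) - m).toNat = k →
      (let st := (PySem.List.pyRange m (s.length : Int) 1).foldl
        (fun (st : List (List Int) × List Int) i =>
          if |PySem.List.pyGetD s i 0 - PySem.List.pyGetD s (i - 1) 0| ≤ threshold then
            (st.1, st.2 ++ [PySem.List.pyGetD s i 0])
          else
            (st.1 ++ [st.2], [PySem.List.pyGetD s i 0]))
        (g0, PySem.List.slice s (some j) (some m))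
       st.1 ++ [st.2])
      = g0 ++ slicesOf s (s.length : Int)  j
          ((PySem.List.pyRange m (s.length : Int) 1).filter
            (fun i => decide (threshold < |PySem.List.pyGetD s i 0 - PySem.List.pyGetD s (i - 1) 0|))) := by
  intro k
  induction k with
  | zero =>
    intro m j g0 h0 hjm hm hk
    have hmn : m = (s.length : Int) := by omega
    subst hmn
    rw [PySem.List.pyRange_one_eq_nil (le_refl _)]
    simp [slicesOf]
  | succ k ih =>
    intro m j g0 h0 hjm hm hk
    have hmn : m < (s.length : Int) := by omega
    rw [PySem.List.pyRange_one_cons hmn]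
    simp only [List.foldl_cons, List.filter_cons]
    by_cases hcl : |PySem.List.pyGetD s m 0 - PySem.List.pyGetD s (m - 1) 0| ≤ threshold
    · rw [if_pos hcl]
      have hnc : (decide (threshold < |PySem.List.pyGetD s m 0 - PySem.List.pyGetD s (m - 1) 0|)) = false := by
        simp; omega
      rw [hnc]
      simp only [Bool.false_eq_true, if_false]
      have := ih (m + 1) j g0 h0 (by omega) (by omega) (by omega)
      rw [slice_snoc s j m h0 hjm hmn]
      exact this
    · rw [if_neg hcl]
      have hc : (decide (threshold < |PySem.List.pyGetD s m 0 - PySem.List.pyGetD s (m - 1) 0|)) = true := by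
        simp; omega
      rw [hc, if_pos rfl]
      have hsing : [PySem.List.pyGetD s m 0] = PySem.List.slice s (some m) (some (m + 1)) := by
        rw [← slice_snoc s m m (by omega) (le_refl _) hmn,
          PySem.List.slice_toNat _ (by omega) (by omega)]
        simp
      rw [hsing]
      have := ih (m + 1) m (g0 ++ [PySem.List.slice s (some j) (some m)]) (by omega) (by omega) (by omega) (by omega)
      rw [this, List.append_assoc]
      rfl

-- ===== VERDICT (by name: the statement is the Claim_ definition above) =====
theorem find_close_values_spec : Claim_equal_find_close_values := by
  intro lst threshold _
  unfold Spec_find_close_values find_close_values find_close_values_alt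
  by_cases hnil : lst.length = 0
  · simp [hnil]
  · rw [if_neg hnil, if_neg hnil]
    dsimp only
    set s := PySem.List.sorted lst (fun x => x) false with hs
    have hslen : s.length = lst.length := PySem.List.length_sorted ..
    have hpos : 1 ≤ (s.length : Int) := by
      have : 0 < lst.length := Nat.pos_of_ne_zero hnil
      omega
    have hinit : [PySem.List.pyGetD s 0 0] = PySem.List.slice s (some 0) (some 1) := by
      rw [show (1 : Int) = 0 + 1 from rfl, ← slice_snoc s 0 0 (by omega) (by omega) (by omega)]
      rw [PySem.List.slice_toNat s (by omega) (by omega)]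
      simp
    rw [hinit, fold_eq_slices s threshold ((s.length : Int) - 1).toNat 1 0 []
      (by omega) (by omega) hpos (by omega)]
    rw [List.nil_append, List.tail_cons, zipmap_slices]
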